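-- pv_equiv track=rewrite | github.com/wlk2109/kq_wlk2109_2020 | CheckMapping.py | check_mapping_actual
-- ===== SOURCE A (Python) =====
-- def check_mapping_actual(s1, s2):
--     # Create a character to character mapping for each string.
--     # Make sure matches are consistent accross the board.
--
--     s1_mapping = {}
--
--     for char1, char2 in zip(s1, s2):
--         if char1 in s1_mapping:
--             if char2 != s1_mapping[char1]:
--                 return False
--         s1_mapping[char1] = char2
--
--     return True
-- ===== SOURCE B (Python) =====
-- def check_mapping_actual(s1, s2):
--     pairs = set(zip(s1, s2))
--     firsts = {c1 for c1, _ in pairs}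
--     return len(pairs) == len(firsts)
-- ===== Notes on version B (the rewrite author's own statement) =====
-- stated objective: simpler
-- what changed: Replaces the early-exit loop with an incrementally maintained char-to-char dict by a counting argument: build the set of (c1,c2) pairs once and return whether there are exactly as many distinct pairs as distinct source characters.
import Mathlib
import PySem

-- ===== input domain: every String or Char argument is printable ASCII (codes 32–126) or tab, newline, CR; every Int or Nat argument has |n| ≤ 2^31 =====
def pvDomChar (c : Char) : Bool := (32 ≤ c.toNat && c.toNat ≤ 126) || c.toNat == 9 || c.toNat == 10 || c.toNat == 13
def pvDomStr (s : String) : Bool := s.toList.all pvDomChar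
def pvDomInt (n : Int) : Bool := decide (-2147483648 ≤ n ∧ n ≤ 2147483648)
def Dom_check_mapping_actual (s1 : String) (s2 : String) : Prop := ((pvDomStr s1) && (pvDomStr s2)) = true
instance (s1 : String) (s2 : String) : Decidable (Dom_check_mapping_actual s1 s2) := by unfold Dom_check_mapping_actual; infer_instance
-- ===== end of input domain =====

-- B decides consistency by counting: |distinct (c1,c2) pairs| = |distinct source chars|, instead of A's early-exit loop with a dict.

-- ===== PORT A =====
-- the 'for char1, char2 in zip(s1, s2)' loop, carrying s1_mapping
def checkLoopA : List (Char × Char) → PySem.Dict Char Char → Bool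
  | [], _ => true
  | (c1, c2) :: rest, m =>
    if m.contains c1 then
      if m.get? c1 != some c2 then false
      else checkLoopA rest (m.insert c1 c2)
    else checkLoopA rest (m.insert c1 c2)

def check_mapping_actual (s1 : String) (s2 : String) : Bool :=
  checkLoopA (s1.toList.zip s2.toList) PySem.Dict.empty

-- ===== PORT B =====
def check_mapping_actual_alt (s1 : String) (s2 : String) : Bool :=
  let pairs : PySem.Set (Char × Char) := PySem.Set.ofList (s1.toList.zip s2.toList)
  let firsts : PySem.Set Char := PySem.Set.ofList (pairs.map Prod.fst)
  pairs.length == firsts.length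

-- ===== PRECONDITION & SPEC =====
def Spec_check_mapping_actual (s1 : String) (s2 : String) (out : Bool) : Prop := out = check_mapping_actual_alt s1 s2
instance (s1 : String) (s2 : String) (out : Bool) : Decidable (Spec_check_mapping_actual s1 s2 out) := by unfold Spec_check_mapping_actual; infer_instance

-- ===== CLAIM (what is proved, stated in full; the proofs are below) =====
def Claim_equal_check_mapping_actual : Prop := ∀ (s1 : String) (s2 : String), Dom_check_mapping_actual s1 s2 → Spec_check_mapping_actual s1 s2 (check_mapping_actual s1 s2)

-- ===== LEMMAS AND PROOFS =====

-- the mapping determined by the pair list is a function: equal sources force equal targets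
def pvFunctional (zs : List (Char × Char)) : Prop :=
  ∀ p ∈ zs, ∀ q ∈ zs, p.1 = q.1 → p.2 = q.2

-- the pair list is consistent with the dict accumulated so far
def pvCompat (m : PySem.Dict Char Char) (zs : List (Char × Char)) : Prop :=
  ∀ p ∈ zs, ∀ v, m.get? p.1 = some v → p.2 = v

theorem pv_step_iff (c1 c2 : Char) (rest : List (Char × Char)) (m : PySem.Dict Char Char)
    (hv : m.get? c1 = some c2 ∨ m.get? c1 = none) :
    (pvFunctional rest ∧ pvCompat (m.insert c1 c2) rest) ↔
      (pvFunctional ((c1, c2) :: rest) ∧ pvCompat m ((c1, c2) :: rest)) := by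
  constructor
  · rintro ⟨hf, hcmp⟩
    constructor
    · intro p hp q hq h1
      rcases List.mem_cons.1 hp with hp | hp <;> rcases List.mem_cons.1 hq with hq | hq
      · rw [hp, hq]
      · subst hp
        have := hcmp q hq c2
        rw [← h1, PySem.Dict.get?_insert_self] at this
        exact (this rfl).symm
      · subst hq
        have := hcmp p hp c2
        rw [h1, PySem.Dict.get?_insert_self] at this
        exact this rfl
      · exact hf p hp q hq h1
    · intro p hp v hpv
      rcases List.mem_cons.1 hp with hp | hp
      · subst hp
        rcases hv with hv | hv
        · rw [hpv] at hv; exact (Option.some_inj.1 hv).symm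
        · rw [hpv] at hv; exact absurd hv (by simp)
      · by_cases h1 : p.1 = c1
        · rcases hv with hv' | hv'
          · have hc2 : v = c2 := by
              rw [h1, hv'] at hpv; exact (Option.some_inj.1 hpv).symm
            have := hcmp p hp c2
            rw [h1, PySem.Dict.get?_insert_self] at this
            rw [hc2]; exact this rfl
          · rw [h1, hv'] at hpv; exact absurd hpv (by simp)
        · have := hcmp p hp v
          rw [PySem.Dict.get?_insert, if_neg h1] at this
          exact this hpv
  · rintro ⟨hf, hcmp⟩
    constructor
    · intro p hp q hq h1
      exact hf p (List.mem_cons_of_mem _ hp) q (List.mem_cons_of_mem _ hq) h1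
    · intro p hp v hpv
      by_cases h1 : p.1 = c1
      · have hvc : v = c2 := by
          rw [h1, PySem.Dict.get?_insert_self] at hpv
          exact (Option.some_inj.1 hpv).symm
        rw [hvc]
        exact hf p (List.mem_cons_of_mem _ hp) (c1, c2) List.mem_cons_self h1
      · rw [PySem.Dict.get?_insert, if_neg h1] at hpv
        exact hcmp p (List.mem_cons_of_mem _ hp) v hpv

theorem pv_loopA_iff (zs : List (Char × Char)) (m : PySem.Dict Char Char) :
    checkLoopA zs m = true ↔ (pvFunctional zs ∧ pvCompat m zs) := by
  induction zs generalizing m with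
  | nil => simp [checkLoopA, pvFunctional, pvCompat]
  | cons hd rest ih =>
    obtain ⟨c1, c2⟩ := hd
    rw [checkLoopA]
    by_cases hc : m.contains c1 = true
    · rw [if_pos hc]
      have hsome : (m.get? c1).isSome := by
        rw [← PySem.Dict.contains_eq_isSome_get?]; exact hc
      rcases hv : m.get? c1 with _ | v
      · rw [hv] at hsome; exact absurd hsome (by simp)
      · by_cases hne : v = c2
        · subst hne
          rw [if_neg (by simp), ih, pv_step_iff c1 v rest m (Or.inl hv)]
        · have : (some v != some c2) = true := by simp [hne]
          rw [this, if_pos rfl]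
          constructor
          · intro h; exact absurd h (by simp)
          · rintro ⟨_, hcmp⟩
            have := hcmp (c1, c2) List.mem_cons_self v hv
            exact absurd this.symm hne
    · rw [if_neg hc]
      have hnone : m.get? c1 = none := by
        rw [PySem.Dict.get?_eq_none_iff_contains]
        exact Bool.not_eq_true _ ▸ hc
      rw [ih, pv_step_iff c1 c2 rest m (Or.inr hnone)]

theorem pv_toFinset_ofList (xs : List (Char × Char)) :
    (PySem.Set.ofList xs).toFinset = xs.toFinset := by
  ext p; simp [PySem.Set.mem_ofList]

theorem pv_alt_iff (s1 s2 : String) :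
    check_mapping_actual_alt s1 s2 = true ↔ pvFunctional (s1.toList.zip s2.toList) := by
  set zs := s1.toList.zip s2.toList with hzs
  show ((PySem.Set.ofList zs).length == (PySem.Set.ofList ((PySem.Set.ofList zs).map Prod.fst)).length) = true ↔ _
  rw [beq_iff_eq]
  have hpairs : (PySem.Set.ofList zs).length = zs.toFinset.card := by
    rw [← pv_toFinset_ofList, List.toFinset_card_of_nodup (PySem.Set.nodup_ofList zs)]
  have hfirsts : (PySem.Set.ofList ((PySem.Set.ofList zs).map Prod.fst)).length
      = (zs.toFinset.image Prod.fst).card := by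
    have hnd := PySem.Set.nodup_ofList ((PySem.Set.ofList zs).map Prod.fst)
    rw [← List.toFinset_card_of_nodup hnd]
    congr 1
    ext c
    simp [PySem.Set.mem_ofList, List.mem_map]
  rw [hpairs, hfirsts]
  constructor
  · intro h p hp q hq h1
    have hinj : Set.InjOn Prod.fst (zs.toFinset : Set (Char × Char)) :=
      Finset.card_image_iff.1 (by omega)
    have := hinj (by simpa using hp) (by simpa using hq) h1
    rw [this]
  · intro hf
    have hinj : Set.InjOn Prod.fst (zs.toFinset : Set (Char × Char)) := by
      intro p hp q hq h1
      have h2 := hf p (by simpa using hp) q (by simpa using hq) h1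
      exact Prod.ext h1 h2
    rw [Finset.card_image_iff.2 hinj]

theorem pv_A_iff (s1 s2 : String) :
    check_mapping_actual s1 s2 = true ↔ pvFunctional (s1.toList.zip s2.toList) := by
  rw [check_mapping_actual, pv_loopA_iff]
  constructor
  · exact fun h => h.1
  · intro hf
    refine ⟨hf, ?_⟩
    intro p _ v hv
    rw [PySem.Dict.get?_empty] at hv
    exact absurd hv (by simp)

-- ===== VERDICT (by name: the statement is the Claim_ definition above) =====
theorem check_mapping_actual_spec : Claim_equal_check_mapping_actual := by
  intro s1 s2 _
  unfold Spec_check_mapping_actual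
  rw [Bool.eq_iff_iff, pv_A_iff, pv_alt_iff]
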